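-- pv_equiv track=rewrite | github.com/CrisLeaf/pattern-theory | text/rank_encoding.py | rank_encode
-- ===== SOURCE A (Python) =====
-- def get_n_grams(text, memory):
-- 	text_length = len(text)
-- 	n_grams = [["".join([text[i+j] for j in range(k+1)]) for i in range(text_length-k)] for k in range(memory+1)]
-- 	return n_grams
--
-- def get_ranks(text, memory):
-- 	n_grams = get_n_grams(text, memory)
-- 	all_ranks = []
-- 	for i in range(len(n_grams)):
-- 		freq = dict()
-- 		for item in n_grams[i]:
-- 			if item in freq:
-- 				freq[item] += 1
-- 			else:
-- 				freq[item] = 1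
-- 		freq = dict(sorted(freq.items(), key=lambda x: x[1], reverse=True))
-- 		ranks = dict()
-- 		value_ = 0
-- 		rank_ = 0
-- 		for key, value in freq.items():
-- 			if value == value_:
-- 				ranks[key] = rank_
-- 			else:
-- 				rank_ += 1
-- 				ranks[key] = rank_
-- 			value_ = value
-- 		ranks = dict((key, value) for key, value in ranks.items())
-- 		all_ranks.append(ranks)
-- 	return all_ranks
--
-- def rank_encode(text, memory):
-- 	all_ranks = get_ranks(text, memory)
-- 	code = ""
-- 	for index, letter in enumerate(text):
-- 		if index < memory:
-- 			code += str(all_ranks[index][text[0:index+1]])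
-- 		else:
-- 			code += str(all_ranks[memory][text[index-memory:index+1]])
-- 	return int(code)
-- ===== SOURCE B (Python) =====
-- def rank_encode(text, memory):
-- 	n = len(text)
-- 	level_counts = []
-- 	for w in range(min(memory, n - 1) + 1):
-- 		grams = [text[s:s+w+1] for s in range(n - w)]
-- 		level_counts.append([grams.count(g) for g in grams])
-- 	digits = []
-- 	for i in range(n):
-- 		w = min(i, memory)
-- 		counts = level_counts[w]
-- 		f = counts[i - w]
-- 		digits.append(str(1 + len({c for c in counts if c > f})))
-- 	return int("".join(digits))
-- ===== Notes on version B (the rewrite author's own statement) =====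
-- stated objective: alternative
-- what changed: Eliminates A's hash maps and value-sort entirely: B computes each level's occurrence counts by direct list counting (list.count over the window list), reads a position's rank as 1 + the cardinality of the set of strictly greater counts, and never builds a frequency dict, a sorted item list or a rank dict.
import Mathlib
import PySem

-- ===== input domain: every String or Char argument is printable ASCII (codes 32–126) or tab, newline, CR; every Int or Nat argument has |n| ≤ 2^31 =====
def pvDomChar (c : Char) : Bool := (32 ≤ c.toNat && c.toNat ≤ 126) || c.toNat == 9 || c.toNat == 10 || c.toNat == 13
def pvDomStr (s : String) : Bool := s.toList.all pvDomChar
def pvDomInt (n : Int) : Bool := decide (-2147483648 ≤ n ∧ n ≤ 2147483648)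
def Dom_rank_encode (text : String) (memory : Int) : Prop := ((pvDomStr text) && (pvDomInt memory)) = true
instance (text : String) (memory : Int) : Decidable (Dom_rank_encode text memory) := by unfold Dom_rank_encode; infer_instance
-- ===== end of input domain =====

-- B drops A's dictionaries and value-sort entirely: per-position occurrence counts come from
-- direct list counting, and a rank is the cardinality of the set of strictly greater counts
-- plus one (objective: alternative; not faster).

-- ===== PORT A =====
-- Strings are ported as their character lists; n-gram keys are List Char (Python str
-- equality is code-point equality — exact). Where Python A would raise (IndexError on
-- all_ranks, KeyError on a dict lookup, int('') ValueError), the port uses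
-- pyGetD/getD/(·.getD 0); Pre_rank_encode excludes exactly those inputs.

-- "".join([text[i+j] for j in range(k+1)])
def pvA_gram (t : List Char) (k i : Int) : List Char :=
  (PySem.List.pyRange 0 (k + 1)).map (fun j => PySem.List.pyGetD t (i + j) ' ')

def pvA_nGrams (t : List Char) (memory : Int) : List (List (List Char)) :=
  (PySem.List.pyRange 0 (memory + 1)).map (fun k =>
    (PySem.List.pyRange 0 ((t.length : Int) - k)).map (fun i => pvA_gram t k i))

-- the frequency-count loop of get_ranks
def pvA_freq (grams : List (List Char)) : PySem.Dict (List Char) Int :=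
  grams.foldl (fun f item =>
    if f.contains item then f.modify item 0 (· + 1) else f.insert item 1) PySem.Dict.empty

-- the body of get_ranks' rank-assignment loop; state = (ranks, value_, rank_)
def pvA_rankStep (st : PySem.Dict (List Char) Int × Int × Int) (kv : List Char × Int) :
    PySem.Dict (List Char) Int × Int × Int :=
  if kv.2 == st.2.1 then (st.1.insert kv.1 st.2.2, kv.2, st.2.2)
  else (st.1.insert kv.1 (st.2.2 + 1), kv.2, st.2.2 + 1)

-- 'freq = dict(sorted(freq.items(), …))' builds a dict whose items are exactly the sorted
-- pair list (keys unique), and the final 'ranks = dict(… ranks.items())' is the identity;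
-- the rank loop is therefore folded over that sorted item list.
def pvA_ranksOf (grams : List (List Char)) : PySem.Dict (List Char) Int :=
  ((PySem.List.sorted (pvA_freq grams).items (fun x => x.2) true).foldl pvA_rankStep
    (PySem.Dict.empty, 0, 0)).1

def pvA_allRanks (t : List Char) (memory : Int) : List (PySem.Dict (List Char) Int) :=
  let n_grams := pvA_nGrams t memory
  (PySem.List.pyRange 0 (n_grams.length : Int)).foldl
    (fun acc i => acc ++ [pvA_ranksOf (PySem.List.pyGetD n_grams i [])]) []

def rank_encode (text : String) (memory : Int) : Int :=
  let t := text.toList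
  let all_ranks := pvA_allRanks t memory
  let code := (PySem.List.enumerate t).foldl (fun code p =>
    if p.1 < memory then
      code ++ PySem.Int.toChars
        ((PySem.List.pyGetD all_ranks p.1 PySem.Dict.empty).getD
          (PySem.List.slice t (some 0) (some (p.1 + 1))) 0)
    else
      code ++ PySem.Int.toChars
        ((PySem.List.pyGetD all_ranks memory PySem.Dict.empty).getD
          (PySem.List.slice t (some (p.1 - memory)) (some (p.1 + 1))) 0)) []
  (PySem.Int.ofChars? code).getD 0

-- ===== PORT B =====
-- one level's count list: counts[s] = number of occurrences of the s-th window in the level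
def pvB_counts (t : List Char) (w : Int) : List Int :=
  let grams := (PySem.List.pyRange 0 ((t.length : Int) - w)).map
    (fun s => PySem.List.slice t (some s) (some (s + w + 1)))
  grams.map (fun g => (PySem.List.count grams g : Int))

def rank_encode_alt (text : String) (memory : Int) : Int :=
  let t := text.toList
  let level_counts := (PySem.List.pyRange 0 (min memory ((t.length : Int) - 1) + 1)).foldl
    (fun acc w => acc ++ [pvB_counts t w]) []
  let digits := (PySem.List.pyRange 0 (t.length : Int)).foldl
    (fun (digits : List (List Char)) i =>
      let w := min i memory
      let counts := PySem.List.pyGetD level_counts w []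
      let f := PySem.List.pyGetD counts (i - w) 0
      digits ++ [PySem.Int.toChars
        (1 + PySem.Set.len (PySem.Set.ofList (counts.filter (fun c => decide (f < c)))))]) []
  (PySem.Int.ofChars? (PySem.Chars.join [] digits)).getD 0

-- ===== PRECONDITION & SPEC =====
-- A raises ValueError (int('')) on empty text and IndexError (all_ranks[memory] past the
-- end of an empty list) for memory < 0; it returns normally everywhere else.
def Pre_rank_encode (text : String) (memory : Int) : Prop := text ≠ "" ∧ 0 ≤ memory
instance (text : String) (memory : Int) : Decidable (Pre_rank_encode text memory) := by
  unfold Pre_rank_encode; infer_instance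

def pvWitness_rank_encode : String × Int := ("abab", 1)

def Spec_rank_encode (text : String) (memory : Int) (out : Int) : Prop :=
  out = rank_encode_alt text memory
instance (text : String) (memory : Int) (out : Int) : Decidable (Spec_rank_encode text memory out) := by
  unfold Spec_rank_encode; infer_instance

-- ===== CLAIM (what is proved, stated in full; the proofs are below) =====
def Claim_equal_rank_encode : Prop := ∀ (text : String) (memory : Int),
  Dom_rank_encode text memory → Pre_rank_encode text memory →
  Spec_rank_encode text memory (rank_encode text memory)

-- ===== LEMMAS AND PROOFS =====

-- the common slice-form n-gram list of level w
def pvGrams (t : List Char) (w : Int) : List (List Char) :=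
  (PySem.List.pyRange 0 ((t.length : Int) - w)).map
    (fun s => PySem.List.slice t (some s) (some (s + w + 1)))

theorem pvB_counts_eq (t : List Char) (w : Int) :
    pvB_counts t w = (pvGrams t w).map (fun g => (PySem.List.count (pvGrams t w) g : Int)) := rfl

-- the digit (as chars) emitted by A at position i
def pvDigitA (t : List Char) (memory i : Int) : List Char :=
  PySem.Int.toChars ((pvA_ranksOf (pvGrams t (min i memory))).getD
    (PySem.List.slice t (some (i - min i memory)) (some (i + 1))) 0)

-- the digit (as chars) emitted by B at position i
def pvDigitB (t : List Char) (memory i : Int) : List Char :=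
  PySem.Int.toChars (1 + PySem.Set.len (PySem.Set.ofList
    ((pvB_counts t (min i memory)).filter
      (fun c => decide (PySem.List.pyGetD (pvB_counts t (min i memory)) (i - min i memory) 0 < c)))))

-- both frequency computations are about the counter of the gram list
theorem pvA_freq_eq_counter (grams : List (List Char)) :
    pvA_freq grams = PySem.Dict.counter grams := by
  rw [pvA_freq, ← PySem.Dict.foldl_insert_getD_add_one_eq_counter]
  apply PySem.List.foldl_congr_mem
  intro acc x _
  by_cases h : acc.contains x = true
  · simp [h]; exact PySem.Dict.ext_iff.mpr rfl
  · simp [h, PySem.Dict.getD_of_not_contains acc 0 (by simpa using h)]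

-- the rank walk never touches keys it does not meet
theorem pvWalk_getD_notmem (g : List Char) (L : List (List Char × Int)) :
    ∀ (st : PySem.Dict (List Char) Int × Int × Int), g ∉ L.map (·.1) →
    (L.foldl pvA_rankStep st).1.getD g 0 = st.1.getD g 0 := by
  induction L with
  | nil => intro st _; rfl
  | cons kv T ih =>
    intro st h
    simp only [List.map_cons, List.mem_cons, not_or] at h
    simp only [List.foldl_cons]
    rw [ih _ h.2]
    unfold pvA_rankStep
    split <;> simp [PySem.Dict.getD_insert, h.1]

-- A's stateful rank walk computes the 1-based dense rank: starting from state (v_, r_),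
-- the key with value v ends at r_ + #{distinct values u of L with v ≤ u, u ≠ v_}
theorem pvWalk_getD (g : List Char) (v : Int) (L : List (List Char × Int)) :
    ∀ (ranks : PySem.Dict (List Char) Int) (v_ r_ : Int),
    (g, v) ∈ L → L.Pairwise (fun a b => b.2 ≤ a.2) → (L.map (·.1)).Nodup →
    ((∀ p ∈ L, p.2 ≤ v_) ∨ (∀ p ∈ L, p.2 ≠ v_)) →
    (L.foldl pvA_rankStep (ranks, v_, r_)).1.getD g 0 =
      r_ + (((L.map (·.2)).toFinset.filter (fun u => v ≤ u ∧ u ≠ v_)).card : Int) := by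
  induction L with
  | nil => intro ranks v_ r_ hm _ _ _; simp at hm
  | cons kv T ih =>
    intro ranks v_ r_ hm hp hnd hH
    obtain ⟨k, v0⟩ := kv
    have hTle : ∀ p ∈ T, p.2 ≤ v0 := fun p hp' => (List.pairwise_cons.mp hp).1 p hp'
    rw [List.map_cons] at hnd
    have hkT : k ∉ T.map (·.1) := (List.nodup_cons.mp hnd).1
    have hndT : (T.map (·.1)).Nodup := (List.nodup_cons.mp hnd).2
    simp only [List.foldl_cons]
    by_cases hvv : v0 = v_
    · -- no rank increment
      have hstep : pvA_rankStep (ranks, v_, r_) (k, v0) = (ranks.insert k r_, v0, r_) := by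
        unfold pvA_rankStep; simp [hvv]
      rw [hstep]
      by_cases hgk : g = k
      · have hv : v = v0 := by
          rcases List.mem_cons.mp hm with h | h
          · exact (Prod.ext_iff.mp h).2
          · have hmem : g ∈ T.map (·.1) := List.mem_map_of_mem h
            exact absurd (hgk ▸ hmem) hkT
        have hgT : g ∉ T.map (·.1) := hgk ▸ hkT
        rw [pvWalk_getD_notmem g T _ hgT]
        rw [PySem.Dict.getD_insert, if_pos hgk]
        have hc : ((((k, v0) :: T).map (·.2)).toFinset.filter
            (fun u => v ≤ u ∧ u ≠ v_)).card = 0 := by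
          rw [Finset.card_eq_zero, Finset.filter_eq_empty_iff]
          intro u hu
          simp only [List.map_cons, List.toFinset_cons, Finset.mem_insert,
            List.mem_toFinset, List.mem_map] at hu
          rintro ⟨h1, h2⟩
          have hule : u ≤ v0 := by
            rcases hu with rfl | ⟨p, hpT, rfl⟩
            · omega
            · exact hTle p hpT
          exact h2 (by omega)
        rw [hc]
        simp
      · have hgT : (g, v) ∈ T := by
          rcases List.mem_cons.mp hm with h | h
          · exact absurd (congrArg Prod.fst h) hgk
          · exact h
        rw [ih _ v0 r_ hgT (List.pairwise_cons.mp hp).2 hndT (Or.inl hTle)]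
        congr 2
        simp only [List.map_cons, List.toFinset_cons]
        rw [Finset.filter_insert]
        rw [if_neg (by rw [hvv]; exact fun h => h.2 rfl)]
        rw [hvv]
    · -- rank increments
      have hstep : pvA_rankStep (ranks, v_, r_) (k, v0) = (ranks.insert k (r_+1), v0, r_+1) := by
        unfold pvA_rankStep; simp [hvv]
      rw [hstep]
      have hTne : ∀ u ∈ T.map (·.2), u ≠ v_ := by
        intro u hu
        obtain ⟨p, hpT, rfl⟩ := List.mem_map.mp hu
        rcases hH with hle | hne
        · have h1 : v0 ≤ v_ := hle (k, v0) (List.mem_cons_self)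
          have h2 : p.2 ≤ v0 := hTle p hpT
          omega
        · exact hne p (List.mem_cons_of_mem _ hpT)
      by_cases hgk : g = k
      · have hv : v = v0 := by
          rcases List.mem_cons.mp hm with h | h
          · exact (Prod.ext_iff.mp h).2
          · have hmem : g ∈ T.map (·.1) := List.mem_map_of_mem h
            exact absurd (hgk ▸ hmem) hkT
        have hgT : g ∉ T.map (·.1) := hgk ▸ hkT
        rw [pvWalk_getD_notmem g T _ hgT]
        rw [PySem.Dict.getD_insert, if_pos hgk]
        have hc : ((((k, v0) :: T).map (·.2)).toFinset.filter
            (fun u => v ≤ u ∧ u ≠ v_)) = {v0} := by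
          apply Finset.ext
          intro u
          simp only [List.map_cons, List.toFinset_cons, Finset.mem_filter,
            Finset.mem_insert, List.mem_toFinset, List.mem_map, Finset.mem_singleton]
          constructor
          · rintro ⟨h1, h2, h3⟩
            rcases h1 with rfl | ⟨p, hpT, rfl⟩
            · rfl
            · have := hTle p hpT; omega
          · rintro rfl
            exact ⟨Or.inl rfl, by omega, hvv⟩
        rw [hc]
        simp
      · have hgT : (g, v) ∈ T := by
          rcases List.mem_cons.mp hm with h | h
          · exact absurd (congrArg Prod.fst h) hgk
          · exact h
        rw [ih _ v0 (r_+1) hgT (List.pairwise_cons.mp hp).2 hndT (Or.inl hTle)]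
        have hvle : v ≤ v0 := hTle (g, v) hgT
        have hc : ((((k, v0) :: T).map (·.2)).toFinset.filter (fun u => v ≤ u ∧ u ≠ v_))
            = insert v0 ((T.map (·.2)).toFinset.filter (fun u => v ≤ u ∧ u ≠ v0)) := by
          apply Finset.ext
          intro u
          simp only [List.map_cons, List.toFinset_cons, Finset.mem_filter,
            Finset.mem_insert, List.mem_toFinset]
          constructor
          · rintro ⟨h1, h2, h3⟩
            rcases h1 with rfl | h1
            · exact Or.inl rfl
            · by_cases hu0 : u = v0
              · exact Or.inl hu0
              · exact Or.inr ⟨h1, h2, hu0⟩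
          · rintro (rfl | ⟨h1, h2, h3⟩)
            · exact ⟨Or.inl rfl, hvle, hvv⟩
            · exact ⟨Or.inr h1, h2, hTne u h1⟩
        rw [hc]
        rw [Finset.card_insert_of_notMem (by simp)]
        push_cast
        ring

-- A's walked rank of a gram g of level w is 1 + #{distinct frequency values > freq(g)}
theorem pvA_rank (t : List Char) (w : Int) (g : List Char) (hg : g ∈ pvGrams t w) :
    (pvA_ranksOf (pvGrams t w)).getD g 0 =
      1 + ((((PySem.Dict.counter (pvGrams t w)).values.toFinset.filter
        (fun u => (((pvGrams t w).count g : Nat) : Int) < u)).card : Nat) : Int) := by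
  set grams := pvGrams t w with hgr
  set c := PySem.Dict.counter grams with hc
  set v : Int := ((grams.count g : Nat) : Int) with hv
  have hvpos : 1 ≤ v := by
    have := List.count_pos_iff.mpr hg
    omega
  have hgset : g ∈ PySem.Set.ofList grams := (PySem.Set.mem_ofList grams g).mpr hg
  have hitems : c.items = (PySem.Set.ofList grams).map (fun k => (k, (grams.count k : Int))) :=
    PySem.Dict.items_counter grams
  have hvalues : c.values = (PySem.Set.ofList grams).map (fun k => (grams.count k : Int)) := by
    show c.items.map (·.2) = _
    rw [hitems, List.map_map]
    rfl
  have hvmem : v ∈ c.values := by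
    rw [hvalues]
    exact List.mem_map_of_mem hgset
  have hpos : ∀ u ∈ c.values, 1 ≤ u := by
    intro u hu
    rw [hvalues] at hu
    obtain ⟨k, hk, rfl⟩ := List.mem_map.mp hu
    have : k ∈ grams := (PySem.Set.mem_ofList grams k).mp hk
    have := List.count_pos_iff.mpr this
    omega
  have hfreqA : pvA_freq grams = c := pvA_freq_eq_counter grams
  rw [pvA_ranksOf, hfreqA]
  set L := PySem.List.sorted c.items (fun x => x.2) true with hL
  have hperm : L.Perm c.items := PySem.List.sorted_perm _ _ _
  have hmL : (g, v) ∈ L := by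
    rw [PySem.List.mem_sorted, hitems]
    exact List.mem_map_of_mem hgset
  have hpair : L.Pairwise (fun a b => b.2 ≤ a.2) := PySem.List.sorted_pairwise_rev _ _
  have hndk : (L.map (·.1)).Nodup := by
    have h1 : (L.map (·.1)).Perm (c.items.map (·.1)) := hperm.map _
    have h2 : (c.items.map (·.1)).Nodup := PySem.Dict.nodup_keys_counter grams
    exact h1.symm.nodup h2
  have hH : (∀ p ∈ L, p.2 ≤ (0:Int)) ∨ (∀ p ∈ L, p.2 ≠ (0:Int)) := by
    right
    intro p hp
    have : p.2 ∈ c.values := by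
      have : p ∈ c.items := hperm.mem_iff.mp hp
      exact List.mem_map_of_mem this
    have := hpos p.2 this
    omega
  rw [pvWalk_getD g v L PySem.Dict.empty 0 0 hmL hpair hndk hH]
  have hfsL : (L.map (·.2)).toFinset = c.values.toFinset :=
    List.toFinset_eq_of_perm _ _ (hperm.map _)
  rw [hfsL]
  have hset : c.values.toFinset.filter (fun u => v ≤ u ∧ u ≠ 0)
      = insert v (c.values.toFinset.filter (fun u => v < u)) := by
    apply Finset.ext; intro u
    simp only [Finset.mem_filter, Finset.mem_insert, List.mem_toFinset]
    constructor
    · rintro ⟨h1, h2, h3⟩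
      rcases eq_or_lt_of_le h2 with rfl | h
      · exact Or.inl rfl
      · exact Or.inr ⟨h1, h⟩
    · rintro (rfl | ⟨h1, h2⟩)
      · exact ⟨List.mem_toFinset.mp (List.mem_toFinset.mpr hvmem), le_refl _, by omega⟩
      · exact ⟨h1, le_of_lt h2,
          by have := hpos u (List.mem_toFinset.mp (List.mem_toFinset.mpr h1)); omega⟩
  rw [hset, Finset.card_insert_of_notMem (by simp)]
  push_cast
  ring

-- B's set-cardinality rank is the same quantity
theorem pvB_rank (t : List Char) (w : Int) (g : List Char) (_hg : g ∈ pvGrams t w) :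
    1 + PySem.Set.len (PySem.Set.ofList ((pvB_counts t w).filter
        (fun c => decide ((((pvGrams t w).count g : Nat) : Int) < c)))) =
      1 + ((((PySem.Dict.counter (pvGrams t w)).values.toFinset.filter
        (fun u => (((pvGrams t w).count g : Nat) : Int) < u)).card : Nat) : Int) := by
  set grams := pvGrams t w with hgr
  set v : Int := ((grams.count g : Nat) : Int) with hv
  set c := PySem.Dict.counter grams with hc
  set l := (pvB_counts t w).filter (fun c => decide (v < c)) with hl
  have hvalues : c.values = (PySem.Set.ofList grams).map (fun k => (grams.count k : Int)) := by
    show c.items.map (·.2) = _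
    rw [PySem.Dict.items_counter, List.map_map]
    rfl
  -- the length of the distinct-element list is the toFinset card
  have hfs0 : (PySem.Set.ofList l).toFinset = l.toFinset := by
    apply Finset.ext
    intro u
    simp [PySem.Set.mem_ofList l u]
  have hlen : PySem.Set.len (PySem.Set.ofList l) = ((l.toFinset.card : Nat) : Int) := by
    show (((PySem.Set.ofList l).length : Nat) : Int) = _
    rw [← List.toFinset_card_of_nodup (PySem.Set.nodup_ofList l), hfs0]
  have hfs : (pvB_counts t w).toFinset = c.values.toFinset := by
    apply Finset.ext
    intro u
    rw [pvB_counts_eq]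
    simp only [List.mem_toFinset, List.mem_map, hvalues]
    constructor
    · rintro ⟨k, hk, rfl⟩
      exact ⟨k, (PySem.Set.mem_ofList grams k).mpr hk, by rw [PySem.List.count_eq]⟩
    · rintro ⟨k, hk, rfl⟩
      exact ⟨k, (PySem.Set.mem_ofList grams k).mp hk, by rw [PySem.List.count_eq]⟩
  have hset : l.toFinset = c.values.toFinset.filter (fun u => v < u) := by
    rw [hl, List.toFinset_filter, hfs]
    apply Finset.filter_congr
    intro u _
    simp
  rw [hlen, hset]

-- A's joined n-grams are the slices
theorem pvRangeMap_take (t : List Char) : ∀ (c a : Nat), a + c ≤ t.length →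
    (List.range c).map (fun (j : Nat) => PySem.List.pyGetD t ((a : Int) + (j : Int)) ' ')
      = (t.drop a).take c := by
  intro c
  induction c with
  | zero => intro a _; simp
  | succ c ih =>
    intro a h
    rw [List.range_succ, List.map_append, ih a (by omega)]
    have hlt : a + c < t.length := by omega
    rw [List.take_add_one]
    congr 1
    simp only [List.map_cons, List.map_nil]
    have : ((a : Int) + (c : Int)) = ((a + c : Nat) : Int) := by push_cast; ring
    rw [this, PySem.List.pyGetD_natCast]
    rw [List.getElem?_drop]
    simp [List.getD, List.getElem?_eq_getElem hlt]

theorem pvA_gram_eq (t : List Char) (k i : Int) (hk : 0 ≤ k) (h0 : 0 ≤ i)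
    (hin : i + k + 1 ≤ (t.length : Int)) :
    pvA_gram t k i = PySem.List.slice t (some i) (some (i + k + 1)) := by
  rw [PySem.List.slice_toNat _ h0 (by omega)]
  unfold pvA_gram
  rw [PySem.List.pyRange_one]
  rw [List.map_map]
  have hc : ((k + 1 - 0).toNat) = (k+1).toNat := by omega
  rw [hc]
  have := pvRangeMap_take t (k+1).toNat i.toNat (by omega)
  rw [show ((i + k + 1).toNat - i.toNat) = (k+1).toNat by omega]
  rw [← this]
  apply List.map_congr_left
  intro j _
  simp only [Function.comp]
  congr 1
  omega

theorem pvA_grams_eq (t : List Char) (k : Int) (hk : 0 ≤ k) :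
    (PySem.List.pyRange 0 ((t.length : Int) - k)).map (fun i => pvA_gram t k i) =
      pvGrams t k := by
  unfold pvGrams
  apply List.map_congr_left
  intro i hi
  rw [PySem.List.mem_pyRange_one] at hi
  rw [pvA_gram_eq t k i hk hi.1 (by omega)]

-- ''.join with empty separator is flatten
theorem pvJoinNil (parts : List (List Char)) : PySem.Chars.join [] parts = parts.flatten := by
  induction parts with
  | nil => simp [PySem.Chars.join_nil]
  | cons p ps ih =>
    cases ps with
    | nil => simp [PySem.Chars.join_singleton]
    | cons q qs =>
      rw [PySem.Chars.join_cons_cons]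
      simp at ih ⊢
      simp [ih]

-- A's rank-dict list, element by element
theorem pvAllRanks_eq (t : List Char) (memory : Int) (_hm : 0 ≤ memory) :
    pvA_allRanks t memory =
      (PySem.List.pyRange 0 (memory + 1)).map (fun k => pvA_ranksOf (pvGrams t k)) := by
  rw [pvA_allRanks]
  rw [PySem.List.foldl_pyRange_zero_pyGetD' (pvA_nGrams t memory) []
    (fun acc x => acc ++ [pvA_ranksOf x]) []]
  rw [PySem.List.foldl_append_singleton_eq_map]
  rw [pvA_nGrams, List.map_map]
  simp only [List.nil_append]
  apply List.map_congr_left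
  intro k hk
  rw [PySem.List.mem_pyRange_one] at hk
  simp only [Function.comp]
  rw [pvA_grams_eq t k hk.1]

theorem pvRanks_at (t : List Char) (memory : Int) (hm : 0 ≤ memory) (ℓ : Int)
    (h0 : 0 ≤ ℓ) (h1 : ℓ ≤ memory) :
    PySem.List.pyGetD (pvA_allRanks t memory) ℓ PySem.Dict.empty =
      pvA_ranksOf (pvGrams t ℓ) := by
  rw [pvAllRanks_eq t memory hm]
  have hn : memory + 1 = (((memory + 1).toNat : Nat) : Int) := by omega
  have hl : ℓ = ((ℓ.toNat : Nat) : Int) := by omega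
  rw [hn, hl, PySem.List.pyGetD_map_pyRange _ _ _ _ (by omega)]

theorem pvGram_mem (t : List Char) (w s : Int) (h0 : 0 ≤ s) (h1 : s < (t.length : Int) - w) :
    PySem.List.slice t (some s) (some (s + w + 1)) ∈ pvGrams t w := by
  rw [pvGrams]
  exact List.mem_map_of_mem (PySem.List.mem_pyRange_one.mpr ⟨h0, h1⟩)

-- B's f-lookup is the count of the window at position i
theorem pvB_f_eq (t : List Char) (w i : Int) (h0 : 0 ≤ i - w) (_hw : 0 ≤ w)
    (h1 : i < (t.length : Int)) :
    PySem.List.pyGetD (pvB_counts t w) (i - w) 0 =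
      (((pvGrams t w).count (PySem.List.slice t (some (i - w)) (some (i + 1))) : Nat) : Int) := by
  simp only [pvB_counts_eq, pvGrams, List.map_map]
  have hn : (t.length : Int) - w = ((((t.length : Int) - w).toNat : Nat) : Int) := by omega
  have hk : i - w = (((i - w).toNat : Nat) : Int) := by omega
  rw [hn, hk, PySem.List.pyGetD_map_pyRange _ _ _ _ (by omega)]
  simp only [Function.comp]
  rw [← hn, ← hk, show i - w + w + 1 = i + 1 by ring, PySem.List.count_eq]

-- per-index equality of the emitted digit chars
theorem pvDigit_eq (t : List Char) (memory : Int) (hm : 0 ≤ memory) (i : Int)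
    (h0 : 0 ≤ i) (h1 : i < (t.length : Int)) :
    pvDigitA t memory i = pvDigitB t memory i := by
  set w := min i memory with hw
  have hw0 : 0 ≤ w := by omega
  have hiw : 0 ≤ i - w := by omega
  have hmem : PySem.List.slice t (some (i - w)) (some (i + 1)) ∈ pvGrams t w := by
    have := pvGram_mem t w (i - w) hiw (by omega)
    rwa [show i - w + w + 1 = i + 1 by ring] at this
  rw [pvDigitA, pvDigitB, ← hw]
  rw [pvB_f_eq t w i hiw hw0 h1]
  rw [pvA_rank t w _ hmem, ← pvB_rank t w _ hmem]

-- A's code loop emits pvDigitA at each index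
theorem pvA_digits (t : List Char) (memory : Int) (hm : 0 ≤ memory) :
    (PySem.List.enumerate t).foldl (fun code p =>
      if p.1 < memory then
        code ++ PySem.Int.toChars
          ((PySem.List.pyGetD (pvA_allRanks t memory) p.1 PySem.Dict.empty).getD
            (PySem.List.slice t (some 0) (some (p.1 + 1))) 0)
      else
        code ++ PySem.Int.toChars
          ((PySem.List.pyGetD (pvA_allRanks t memory) memory PySem.Dict.empty).getD
            (PySem.List.slice t (some (p.1 - memory)) (some (p.1 + 1))) 0)) [] =
    ((PySem.List.pyRange 0 (t.length : Int)).map (fun i => pvDigitA t memory i)).flatten := by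
  rw [PySem.List.enumerate_eq_map_pyRange t ' ', List.foldl_map]
  have h1 : List.foldl (fun (code : List Char) (j : Int) =>
      if j < memory then
        code ++ PySem.Int.toChars
          ((PySem.List.pyGetD (pvA_allRanks t memory) j PySem.Dict.empty).getD
            (PySem.List.slice t (some 0) (some (j + 1))) 0)
      else
        code ++ PySem.Int.toChars
          ((PySem.List.pyGetD (pvA_allRanks t memory) memory PySem.Dict.empty).getD
            (PySem.List.slice t (some (j - memory)) (some (j + 1))) 0)) []
      (PySem.List.pyRange 0 ((t.length : Int))) =
    List.foldl (fun (code : List Char) (j : Int) => code ++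
      (if j < memory then
        PySem.Int.toChars
          ((PySem.List.pyGetD (pvA_allRanks t memory) j PySem.Dict.empty).getD
            (PySem.List.slice t (some 0) (some (j + 1))) 0)
      else
        PySem.Int.toChars
          ((PySem.List.pyGetD (pvA_allRanks t memory) memory PySem.Dict.empty).getD
            (PySem.List.slice t (some (j - memory)) (some (j + 1))) 0))) []
      (PySem.List.pyRange 0 ((t.length : Int))) := by
    apply PySem.List.foldl_congr_mem
    intro acc x _
    by_cases h : x < memory <;> simp [h]
  have h2 := PySem.List.foldl_append_eq_flatMap
    (g := fun (j : Int) =>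
      (if j < memory then
        PySem.Int.toChars
          ((PySem.List.pyGetD (pvA_allRanks t memory) j PySem.Dict.empty).getD
            (PySem.List.slice t (some 0) (some (j + 1))) 0)
      else
        PySem.Int.toChars
          ((PySem.List.pyGetD (pvA_allRanks t memory) memory PySem.Dict.empty).getD
            (PySem.List.slice t (some (j - memory)) (some (j + 1))) 0)))
    (l := PySem.List.pyRange 0 ((t.length : Int))) (acc := [])
  have h3 : (PySem.List.pyRange 0 ((t.length : Int))).flatMap
      (fun (j : Int) =>
      (if j < memory then
        PySem.Int.toChars
          ((PySem.List.pyGetD (pvA_allRanks t memory) j PySem.Dict.empty).getD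
            (PySem.List.slice t (some 0) (some (j + 1))) 0)
      else
        PySem.Int.toChars
          ((PySem.List.pyGetD (pvA_allRanks t memory) memory PySem.Dict.empty).getD
            (PySem.List.slice t (some (j - memory)) (some (j + 1))) 0))) =
      ((PySem.List.pyRange 0 ((t.length : Int))).map
        (fun i => pvDigitA t memory i)).flatten := by
    rw [List.flatMap_def]
    congr 1
    apply List.map_congr_left
    intro j hj
    rw [PySem.List.mem_pyRange_one] at hj
    rw [pvDigitA]
    by_cases hc : j < memory
    · rw [if_pos hc]
      have hwm : min j memory = j := min_eq_left (le_of_lt hc)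
      rw [hwm, pvRanks_at t memory hm j hj.1 (le_of_lt hc)]
      rw [show j - j = (0 : Int) by ring]
    · rw [if_neg hc]
      have hwm : min j memory = memory := min_eq_right (by omega)
      rw [hwm, pvRanks_at t memory hm memory hm (le_refl _)]
  exact h1.trans (h2.trans (by rw [List.nil_append, h3]))

set_option maxHeartbeats 2000000 in
theorem pvMain (text : String) (memory : Int) (hne : text ≠ "") (hm : 0 ≤ memory) :
    rank_encode text memory = rank_encode_alt text memory := by
  simp only [rank_encode, rank_encode_alt]
  set t := text.toList with ht
  have htne : t ≠ [] := fun h => hne (String.toList_inj.mp (by simpa [ht] using h))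
  have hn1 : 1 ≤ (t.length : Int) := by
    have : t.length ≠ 0 := fun h => htne (List.eq_nil_of_length_eq_zero h)
    omega
  rw [pvA_digits t memory hm]
  -- B side: the level_counts fold is a map, so each lookup yields pvB_counts
  have hget : ∀ i : Int, 0 ≤ i → i < (t.length : Int) →
      PySem.List.pyGetD ((PySem.List.pyRange 0 (min memory ((t.length : Int) - 1) + 1)).foldl
        (fun acc w => acc ++ [pvB_counts t w]) []) (min i memory) [] =
      pvB_counts t (min i memory) := by
    intro i hi0 hi1
    rw [PySem.List.foldl_append_singleton_eq_map, List.nil_append]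
    have hb : min memory ((t.length : Int) - 1) + 1 =
        (((min memory ((t.length : Int) - 1) + 1).toNat : Nat) : Int) := by omega
    have hk : min i memory = (((min i memory).toNat : Nat) : Int) := by omega
    rw [hb, hk, PySem.List.pyGetD_map_pyRange _ _ _ _ (by omega), ← hk]
  rw [PySem.List.foldl_append_singleton_eq_map, List.nil_append, pvJoinNil]
  congr 2
  congr 1
  apply List.map_congr_left
  intro i hi
  rw [PySem.List.mem_pyRange_one] at hi
  rw [hget i hi.1 hi.2]
  exact pvDigit_eq t memory hm i hi.1 hi.2

-- ===== VERDICT (by name: the statement is the Claim_ definition above) =====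
theorem rank_encode_spec : Claim_equal_rank_encode := by
  intro text memory _ hpre
  show rank_encode text memory = rank_encode_alt text memory
  exact pvMain text memory hpre.1 hpre.2
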